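-- pv_equiv track=rewrite | github.com/iajoiner/boston-crime-revisited | production/predict.py | max_with_null
-- ===== SOURCE A (Python) =====
-- def intize(string):
--     try:
--         num = int(string)
--         return num
--     except ValueError as e:
--         return None
--
-- def max_with_null(string_list):
--     res = None
--     is_nonnull = False
--     for string in string_list:
--         nullable_num = intize(string)
--         if isinstance(nullable_num, int):
--             if not is_nonnull:
--                 res = nullable_num
--                 is_nonnull = True
--             else:
--                 if res < nullable_num:
--                     res = nullable_num
--     return res
-- ===== SOURCE B (Python) =====
-- def intize(string):
--     try:
--         num = int(string)
--         return num
--     except ValueError as e: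
--         return None
--
-- def max_with_null(string_list):
--     nums = sorted(n for n in map(intize, string_list) if isinstance(n, int))
--     return nums[-1] if nums else None
-- ===== Notes on version B (the rewrite author's own statement) =====
-- stated objective: alternative
-- what changed: Replaces the fused running-max-with-flag loop by sort-then-select: parse and filter the ints, sort them ascending, and return the last element of the sorted list (None if empty); it trades O(n) for O(n log n) in exchange for a reduction-free decomposition.
import Mathlib
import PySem

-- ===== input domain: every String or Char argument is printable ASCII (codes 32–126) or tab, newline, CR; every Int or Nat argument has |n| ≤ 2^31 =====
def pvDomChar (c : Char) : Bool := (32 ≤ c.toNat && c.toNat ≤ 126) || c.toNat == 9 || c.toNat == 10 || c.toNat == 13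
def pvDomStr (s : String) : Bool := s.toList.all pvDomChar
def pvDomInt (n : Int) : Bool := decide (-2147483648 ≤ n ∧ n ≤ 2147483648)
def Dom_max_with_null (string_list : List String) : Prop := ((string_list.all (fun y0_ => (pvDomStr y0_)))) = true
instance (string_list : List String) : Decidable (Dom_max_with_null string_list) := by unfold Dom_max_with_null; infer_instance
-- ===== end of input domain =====

-- B replaces A's fused running-max-with-flag loop by sort-then-select: filter the parseable ints, sort ascending, return the last element (None if empty).

-- ===== PORT A =====
-- intize: int(string) with ValueError -> None
def intize (string : String) : Option Int := PySem.Int.ofStr? string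

-- the loop body of A, over state (res, is_nonnull)
def maxStepA (st : Option Int × Bool) (string : String) : Option Int × Bool :=
  match intize string with
  | some nullable_num =>
      if st.2 = false then (some nullable_num, true)
      else match st.1 with
           | some res => (if res < nullable_num then some nullable_num else some res, true)
           | none => st   -- unreachable: is_nonnull = true implies res is an int
  | none => st

def max_with_null (string_list : List String) : Option Int :=
  (string_list.foldl maxStepA (none, false)).1

-- ===== PORT B =====
def max_with_null_alt (string_list : List String) : Option Int :=
  if PySem.List.sorted ((string_list.map intize).filterMap (fun n => n)) (fun x => x) false = []
  then none
  else PySem.List.pyGet? (PySem.List.sorted ((string_list.map intize).filterMap (fun n => n)) (fun x => x) false) (-1)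

-- ===== PRECONDITION & SPEC =====
def Spec_max_with_null (string_list : List String) (out : Option Int) : Prop := out = max_with_null_alt string_list
instance (string_list : List String) (out : Option Int) : Decidable (Spec_max_with_null string_list out) := by unfold Spec_max_with_null; infer_instance

-- ===== CLAIM (what is proved, stated in full; the proofs are below) =====
def Claim_equal_max_with_null : Prop := ∀ (string_list : List String), Dom_max_with_null string_list → Spec_max_with_null string_list (max_with_null string_list)

-- ===== LEMMAS AND PROOFS =====

-- A's loop over state (some r, true) is the running max of the remaining parsed ints
lemma foldA_some (xs : List String) : ∀ (r : Int),
    (xs.foldl maxStepA (some r, true)).1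
      = some (((xs.map intize).filterMap (fun n => n)).foldl max r) := by
  induction xs with
  | nil => intro r; simp
  | cons x t ih =>
    intro r
    simp only [List.foldl_cons, List.map_cons, maxStepA]
    cases h : intize x with
    | none => simp [ih r]
    | some n =>
      have : (if r < n then some n else some r) = some (max r n) := by
        split_ifs with hlt <;> congr 1 <;> omega
      simp [this, ih]

-- A = max?(parsed ints)
lemma foldA_none (xs : List String) :
    (xs.foldl maxStepA (none, false)).1
      = PySem.List.max? ((xs.map intize).filterMap (fun n => n)) (fun y => y) := by
  induction xs with
  | nil => simp [PySem.List.max?]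
  | cons x t ih =>
    simp only [List.foldl_cons, List.map_cons, maxStepA]
    cases h : intize x with
    | none => simp [ih]
    | some n =>
      have e1 : List.filterMap (fun n => n) (some n :: List.map intize t)
          = n :: List.filterMap (fun n => n) (List.map intize t) := by simp
      rw [e1, PySem.List.max?_id_cons]
      simpa using foldA_some t n

-- in a ≤-sorted chain the last element bounds every member
lemma le_getLast_of_pairwise (s : List Int) (hp : s.Pairwise (· ≤ ·))
    (g : Int) (hg : s.getLast? = some g) : ∀ y ∈ s, y ≤ g := by
  obtain ⟨l, rfl⟩ := List.getLast?_eq_some_iff.1 hg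
  intro y hy
  rcases List.mem_append.1 hy with h | h
  · exact (List.pairwise_append.1 hp).2.2 y h g (by simp)
  · simp at h; omega

-- max?(l) = last element of sorted(l)
lemma max?_eq_getLast_sorted (l : List Int) :
    PySem.List.max? l (fun y => y)
      = (PySem.List.sorted l (fun x => x) false).getLast? := by
  rcases eq_or_ne l [] with rfl | hne
  · rw [(PySem.List.sorted_eq_nil_iff [] (fun x : Int => x) false).2 rfl]; simp [PySem.List.max?]
  · set s := PySem.List.sorted l (fun x => x) false with hs
    have hperm : s.Perm l := PySem.List.sorted_perm l _ false
    have hpair : s.Pairwise (· ≤ ·) := by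
      simpa [hs] using PySem.List.sorted_pairwise (xs := l) (key := fun x : Int => x)
    have hsne : s ≠ [] := fun h => hne (((PySem.List.sorted_eq_nil_iff l (fun x : Int => x) false).1 (hs ▸ h)))
    obtain ⟨g, hg⟩ := Option.ne_none_iff_exists'.1 (mt List.getLast?_eq_none_iff.1 hsne)
    have hgmem : g ∈ s := List.mem_of_getLast? hg
    obtain ⟨x, t, rfl⟩ := List.exists_cons_of_ne_nil hne
    rw [PySem.List.max?_id_cons, hg]
    set m := t.foldl max x with hm
    have hmem : m ∈ x :: t :=
      PySem.List.max?_mem (xs := x :: t) (key := fun y => y) (m := m)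
        (by rw [PySem.List.max?_id_cons])
    have hub : ∀ y ∈ x :: t, y ≤ m := by
      intro y hy
      simpa using PySem.List.max?_isMax (xs := x :: t) (key := fun y => y) (m := m)
        (by rw [PySem.List.max?_id_cons]) y hy
    have h1 : m ≤ g := le_getLast_of_pairwise s hpair g hg m (hperm.mem_iff.2 hmem)
    have h2 : g ≤ m := hub g (hperm.mem_iff.1 hgmem)
    exact congrArg some (le_antisymm h1 h2)

-- ===== VERDICT (by name: the statement is the Claim_ definition above) =====
theorem max_with_null_spec : Claim_equal_max_with_null := by
  intro xs _
  show max_with_null xs = max_with_null_alt xs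
  unfold max_with_null max_with_null_alt
  rw [foldA_none, max?_eq_getLast_sorted]
  split_ifs with h
  · rw [h]; rfl
  · rw [PySem.List.pyGet?_neg_one]
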